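-- pv_equiv track=rewrite | github.com/mayupei/isu-figure-skating-competitions-web-scraper | scripts/05_judge_cleaning.py | first_name_first
-- ===== SOURCE A (Python) =====
-- def first_name_first(name):
--     ### manual adjustment for two names
--     if name == "van VEEN Wilhelmina":
--         return "Wilhelmina VAN VEEN"
--     if name == "de LACROIX Pierre":
--         return "Pierre DE LACROIX"
--     names = name.split(" ")
--     first_name = []
--     last_name = []
--
--     for n in names:
--         if n.isupper() and len(n) > 1:
--             last_name.append(n)
--         else:
--             first_name.append(n)
--     return " ".join(first_name + last_name)
-- ===== SOURCE B (Python) =====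
-- def first_name_first(name):
--     ### manual adjustment for two names
--     if name == "van VEEN Wilhelmina":
--         return "Wilhelmina VAN VEEN"
--     if name == "de LACROIX Pierre":
--         return "Pierre DE LACROIX"
--     names = name.split(" ")
--     # stable sort: given-name tokens (key False) keep order and precede surname tokens (key True)
--     return " ".join(sorted(names, key=lambda n: n.isupper() and len(n) > 1))
-- ===== Notes on version B (the rewrite author's own statement) =====
-- stated objective: idiomatic
-- what changed: Replaces the explicit loop with two accumulator lists by a single stable sort on the boolean surname predicate, relying on sort stability to keep each group in original order.
import Mathlib
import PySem

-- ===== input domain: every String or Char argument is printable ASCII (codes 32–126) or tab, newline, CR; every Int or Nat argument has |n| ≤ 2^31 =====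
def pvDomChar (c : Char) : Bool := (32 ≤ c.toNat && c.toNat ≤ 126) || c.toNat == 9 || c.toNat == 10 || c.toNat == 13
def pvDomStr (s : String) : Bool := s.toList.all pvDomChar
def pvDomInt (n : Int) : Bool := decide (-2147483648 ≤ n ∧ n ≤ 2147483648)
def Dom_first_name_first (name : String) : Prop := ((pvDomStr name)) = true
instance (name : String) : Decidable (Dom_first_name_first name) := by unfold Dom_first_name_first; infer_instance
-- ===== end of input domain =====

-- B replaces A's two-accumulator loop by one stable sort on the boolean surname
-- predicate (idiomatic; same return value, no side effects involved).

-- Python str.isupper() (exact on the ASCII domain: cased chars are letters):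
-- at least one uppercase letter and no lowercase letter.
def pyStrIsupper (s : String) : Bool :=
  s.toList.any PySem.Chars.isupper && !s.toList.any PySem.Chars.islower

-- the shared token predicate: n.isupper() and len(n) > 1
def pvSurnameKey (n : String) : Bool :=
  pyStrIsupper n && decide (1 < PySem.Str.len n)

-- ===== PORT A =====
def first_name_first (name : String) : String :=
  if name = "van VEEN Wilhelmina" then "Wilhelmina VAN VEEN"
  else if name = "de LACROIX Pierre" then "Pierre DE LACROIX"
  else
    let names := (PySem.Str.split? name " ").getD []
    let acc := names.foldl
      (fun (acc : List String × List String) n =>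
        if pvSurnameKey n then (acc.1, acc.2 ++ [n]) else (acc.1 ++ [n], acc.2))
      ([], [])
    PySem.Str.join " " (acc.1 ++ acc.2)

-- ===== PORT B =====
def first_name_first_alt (name : String) : String :=
  if name = "van VEEN Wilhelmina" then "Wilhelmina VAN VEEN"
  else if name = "de LACROIX Pierre" then "Pierre DE LACROIX"
  else
    let names := (PySem.Str.split? name " ").getD []
    PySem.Str.join " " (PySem.List.sorted names (fun n => pvSurnameKey n))

-- ===== PRECONDITION & SPEC =====
def Spec_first_name_first (name : String) (out : String) : Prop := out = first_name_first_alt name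
instance (name : String) (out : String) : Decidable (Spec_first_name_first name out) := by unfold Spec_first_name_first; infer_instance

-- ===== CLAIM (what is proved, stated in full; the proofs are below) =====
def Claim_equal_first_name_first : Prop := ∀ (name : String), Dom_first_name_first name → Spec_first_name_first name (first_name_first name)

-- ===== LEMMAS AND PROOFS =====

-- A's loop keeps two accumulators: they are the two filters of the input.
theorem foldl_two_acc {α : Type} (key : α → Bool) (xs F T : List α) :
    xs.foldl
      (fun (acc : List α × List α) n =>
        if key n then (acc.1, acc.2 ++ [n]) else (acc.1 ++ [n], acc.2))
      (F, T)
    = (F ++ xs.filter (fun n => !key n), T ++ xs.filter key) := by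
  induction xs generalizing F T with
  | nil => simp
  | cons x xs ih =>
    by_cases h : key x = true
    · simp [List.foldl_cons, h, ih]
    · simp only [Bool.not_eq_true] at h
      simp [List.foldl_cons, h, ih]

-- inserting a key-false element into (all-false ++ all-true) puts it between the groups
theorem insertBy_false {α : Type} (key : α → Bool) (x : α) (hx : key x = false)
    (F T : List α) (hF : ∀ a ∈ F, key a = false) (hT : ∀ a ∈ T, key a = true) :
    PySem.List.insertBy (fun a b => decide (key a < key b)) x (F ++ T)
    = F ++ x :: T := by
  induction F with
  | nil =>
    cases T with
    | nil => simp [PySem.List.insertBy]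
    | cons t ts =>
      have ht : key t = true := hT t (by simp)
      simp [PySem.List.insertBy, hx, ht]
  | cons f fs ih =>
    have hf : key f = false := hF f (by simp)
    have ih' := ih (fun a ha => hF a (List.mem_cons_of_mem _ ha))
    simp only [List.cons_append, PySem.List.insertBy, hx, hf]
    simp [ih']

-- inserting a key-true element appends it at the end
theorem insertBy_true {α : Type} (key : α → Bool) (x : α) (hx : key x = true)
    (ys : List α) :
    PySem.List.insertBy (fun a b => decide (key a < key b)) x ys = ys ++ [x] := by
  apply PySem.List.insertBy_of_forall_not_before
  intro y _
  simp [hx]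

-- the insertion-sort fold keeps the accumulator partitioned: falses (in order) then trues
theorem foldl_insertBy_partition {α : Type} (key : α → Bool) (xs : List α) :
    ∀ (F T : List α), (∀ a ∈ F, key a = false) → (∀ a ∈ T, key a = true) →
    xs.foldl
      (fun acc x => PySem.List.insertBy (fun a b => decide (key a < key b)) x acc)
      (F ++ T)
    = (F ++ xs.filter (fun n => !key n)) ++ (T ++ xs.filter key) := by
  induction xs with
  | nil => intro F T _ _; simp
  | cons x xs ih =>
    intro F T hF hT
    by_cases h : key x = true
    · have : PySem.List.insertBy (fun a b => decide (key a < key b)) x (F ++ T)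
          = F ++ (T ++ [x]) := by
        rw [insertBy_true key x h]; simp
      have hT' : ∀ a ∈ T ++ [x], key a = true := by
        intro a ha
        rcases List.mem_append.1 ha with h' | h'
        · exact hT a h'
        · simp only [List.mem_singleton] at h'; subst h'; exact h
      rw [List.foldl_cons, this, ih F (T ++ [x]) hF hT']
      simp [h]
    · simp only [Bool.not_eq_true] at h
      have : PySem.List.insertBy (fun a b => decide (key a < key b)) x (F ++ T)
          = (F ++ [x]) ++ T := by
        rw [insertBy_false key x h F T hF hT]; simp
      have hF' : ∀ a ∈ F ++ [x], key a = false := by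
        intro a ha
        rcases List.mem_append.1 ha with h' | h'
        · exact hF a h'
        · simp only [List.mem_singleton] at h'; subst h'; exact h
      rw [List.foldl_cons, this, ih (F ++ [x]) T hF' hT]
      simp [h]

-- the stable sort on a Bool key is exactly the false-filter followed by the true-filter
theorem sorted_bool_key {α : Type} (key : α → Bool) (xs : List α) :
    PySem.List.sorted xs (fun n => key n)
    = xs.filter (fun n => !key n) ++ xs.filter key := by
  rw [PySem.List.sorted_eq_foldl_insertBy]
  have := foldl_insertBy_partition key xs [] [] (by simp) (by simp)
  simpa using this

-- ===== VERDICT (by name: the statement is the Claim_ definition above) =====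
theorem first_name_first_spec : Claim_equal_first_name_first := by
  intro name _
  unfold Spec_first_name_first first_name_first first_name_first_alt
  by_cases h1 : name = "van VEEN Wilhelmina"
  · simp [h1]
  by_cases h2 : name = "de LACROIX Pierre"
  · simp [h2]
  simp only [h1, h2, if_false]
  rw [foldl_two_acc, sorted_bool_key]
  simp
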